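-- pv_equiv track=rewrite | github.com/FaXx0/prog2-ejer-prac-class | matriz.py | es_identidad
-- ===== SOURCE A (Python) =====
-- def es_identidad(matriz):
--     #Requisito 1:Debe ser cuadrada
--     num_filas = len(matriz)
--     for fila in matriz:
--         if len(fila) != num_filas:
--             return False
--             #Requisito 2:Diagonal principal debe ser 1 y el resto 0
--     for i in range(num_filas): #Recorremos la matriz
--         for j in range(num_filas): #Recorremos la matriz
--             if i == j: #Si es la diagonal principal
--                 if matriz[i][j] != 1: #Si no es 1, no es identidad
--                     return False #Si no es 1, no es identidad
--             else: #Si no es la diagonal principal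
--                 if matriz[i][j] != 0: #Si no es la diagonal principal
--                     return False #Si no cumple con alguno de los requisitos, no es identidad
--     return True #Si pasa ambos requisitos, es identidad
-- ===== SOURCE B (Python) =====
-- def es_identidad(matriz):
--     n = len(matriz)
--     expected = [[1 if i == j else 0 for j in range(n)] for i in range(n)]
--     return matriz == expected
-- ===== Notes on version B (the rewrite author's own statement) =====
-- stated objective: simpler
-- what changed: Replaces A's squareness pre-check plus nested conditional element scan with building the expected identity matrix and one list equality, which subsumes both checks.
import Mathlib
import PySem

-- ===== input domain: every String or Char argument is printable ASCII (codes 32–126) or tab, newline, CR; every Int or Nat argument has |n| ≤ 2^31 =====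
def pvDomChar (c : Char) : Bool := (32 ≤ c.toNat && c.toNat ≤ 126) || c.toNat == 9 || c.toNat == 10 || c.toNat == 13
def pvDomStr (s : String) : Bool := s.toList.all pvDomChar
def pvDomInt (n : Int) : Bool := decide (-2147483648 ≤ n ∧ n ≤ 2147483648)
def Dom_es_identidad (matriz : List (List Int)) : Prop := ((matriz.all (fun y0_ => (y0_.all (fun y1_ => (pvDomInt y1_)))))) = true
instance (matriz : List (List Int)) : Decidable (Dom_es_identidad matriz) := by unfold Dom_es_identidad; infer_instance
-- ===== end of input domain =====

-- B builds the expected identity matrix and compares once, instead of A's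
-- squareness pre-check plus nested conditional element scan (objective: simpler).

-- ===== PORT A =====
-- range(num_filas) yields 0..n-1, all nonnegative and in range after the squareness
-- check, so List.range with pyGetD-by-cast indexing is exact here.
def es_identidad (matriz : List (List Int)) : Bool :=
  let num_filas := matriz.length
  if matriz.any (fun fila => fila.length ≠ num_filas) then false
  else
    (List.range num_filas).all (fun i =>
      (List.range num_filas).all (fun j =>
        if i == j then
          !(PySem.List.pyGetD (PySem.List.pyGetD matriz (i : Int) []) (j : Int) 0 ≠ 1)
        else
          !(PySem.List.pyGetD (PySem.List.pyGetD matriz (i : Int) []) (j : Int) 0 ≠ 0)))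

-- ===== PORT B =====
def es_identidad_alt (matriz : List (List Int)) : Bool :=
  let n := matriz.length
  let expected := (List.range n).map (fun i =>
    (List.range n).map (fun j => if i == j then (1 : Int) else 0))
  matriz == expected

-- ===== PRECONDITION & SPEC =====
def Spec_es_identidad (matriz : List (List Int)) (out : Bool) : Prop := out = es_identidad_alt matriz
instance (matriz : List (List Int)) (out : Bool) : Decidable (Spec_es_identidad matriz out) := by unfold Spec_es_identidad; infer_instance

-- ===== CLAIM (what is proved, stated in full; the proofs are below) =====
def Claim_equal_es_identidad : Prop := ∀ (matriz : List (List Int)), Dom_es_identidad matriz → Spec_es_identidad matriz (es_identidad matriz)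

-- ===== LEMMAS AND PROOFS =====
theorem es_identidad_eq_alt (matriz : List (List Int)) :
    es_identidad matriz = es_identidad_alt matriz := by
  unfold es_identidad es_identidad_alt
  dsimp only
  set n := matriz.length with hn
  by_cases hsq : ∀ fila ∈ matriz, fila.length = n
  · have hany : matriz.any (fun fila => decide (fila.length ≠ n)) = false := by
      simp only [List.any_eq_false]
      intro x hx
      simpa using hsq x hx
    rw [hany]
    simp only [Bool.false_eq_true, if_false]
    apply Bool.coe_iff_coe.mp
    simp only [List.all_eq_true, List.mem_range, beq_iff_eq]
    constructor
    · intro h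
      apply List.ext_getElem (by simp [← hn])
      intro i hi hi'
      have hi : i < n := hi
      have hrow : (matriz[i]).length = n := hsq _ (List.getElem_mem hi)
      apply List.ext_getElem (by simpa using hrow)
      intro j hj hj'
      have hj : j < (matriz[i]).length := hj
      have hjn : j < n := hrow ▸ hj
      have := h i hi j hjn
      simp only [PySem.List.pyGetD_natCast, List.getD_eq_getElem matriz [] hi,
        List.getD_eq_getElem _ _ hj] at this
      by_cases hij : i = j <;> simp [hij] at this ⊢ <;> simpa using this
    · intro h i hi j hjn
      have hrow : (matriz[i]).length = n := hsq _ (List.getElem_mem hi)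
      have hj : j < (matriz[i]).length := by omega
      simp only [PySem.List.pyGetD_natCast, List.getD_eq_getElem matriz [] hi,
        List.getD_eq_getElem _ _ hj]
      have hI : i < matriz.length := hn ▸ hi
      have hrowe := List.getElem_of_eq h hI
      simp only [List.getElem_map, List.getElem_range] at hrowe
      have hv : (matriz[i])[j] = (if i == j then (1 : Int) else 0) := by
        rw [List.getElem_of_eq hrowe hj]
        simp
      by_cases hij : i = j <;> simp [hij] at hv ⊢ <;> simp [hv]
  · push Not at hsq
    obtain ⟨fila, hmem, hlen⟩ := hsq
    have hany : matriz.any (fun fila => decide (fila.length ≠ n)) = true := by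
      simp only [List.any_eq_true]
      exact ⟨fila, hmem, by simpa using hlen⟩
    rw [hany]
    simp only [if_true]
    symm
    simp only [beq_eq_false_iff_ne]
    intro heq
    apply hlen
    have : fila ∈ (List.range n).map (fun i =>
        (List.range n).map (fun j => if i == j then (1 : Int) else 0)) := heq ▸ hmem
    obtain ⟨i, hi, rfl⟩ := List.mem_map.mp this
    simp

-- ===== VERDICT (by name: the statement is the Claim_ definition above) =====
theorem es_identidad_spec : Claim_equal_es_identidad := by
  intro matriz _
  exact es_identidad_eq_alt matriz
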